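-- pv_equiv track=rewrite | github.com/BananeRotative/Resolveur-de-Sudoku | Résolveur de Sudoku.py | MemeCarre
-- ===== SOURCE A (Python) =====
-- Carres = [[0,1,2,9,10,11,18,19,20],[3,4,5,12,13,14,21,22,23],[6,7,8,15,16,17,24,25,26],[27,28,29,36,37,38,45,46,47],[30,31,32,39,40,41,48,49,50],[33,34,35,42,43,44,51,52,53],[54,55,56,63,64,65,72,73,74],[57,58,59,66,67,68,75,76,77],[60,61,62,69,70,71,78,79,80]]
--
-- def MemeCarre(Case1,Case2):                                                     #indique True ou False selon si les nombres indiqués sont dans le même carre ou non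
--     NumMemeCarre=-1
--     for k in range(9):
--         for l in range(9):
--             if Carres[k][l]==Case1:
--                 NumMemeCarre=k
--                 break
--     message="False"
--     for k in range(9):
--         if Carres[NumMemeCarre][k]==Case2:
--             message="True"
--             break
--     return message
-- ===== SOURCE B (Python) =====
-- def MemeCarre(Case1, Case2):
--     def box(c):
--         return c // 27 * 3 + c % 9 // 3
--     if 0 <= Case1 < 81 and 0 <= Case2 < 81 and box(Case1) == box(Case2):
--         return "True"
--     return "False"
-- ===== Notes on version B (the rewrite author's own statement) =====
-- stated objective: simpler
-- what changed: Replaced the 9x9 table scan for Case1 and the 9-entry row scan for Case2 by a closed-form box index c//27*3 + c%9//3 compared directly.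
-- intended difference: When Case1 is outside 0..80 and Case2 lies in the bottom-right box {60,61,62,69,70,71,78,79,80}, A returns 'True' because its unfound-cell sentinel -1 indexes Carres[-1] (the last box); B returns 'False', the intended answer since an invalid cell is in no box. — e.g. on MemeCarre(81, 60): A returns "True", B returns "False"
import Mathlib
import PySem

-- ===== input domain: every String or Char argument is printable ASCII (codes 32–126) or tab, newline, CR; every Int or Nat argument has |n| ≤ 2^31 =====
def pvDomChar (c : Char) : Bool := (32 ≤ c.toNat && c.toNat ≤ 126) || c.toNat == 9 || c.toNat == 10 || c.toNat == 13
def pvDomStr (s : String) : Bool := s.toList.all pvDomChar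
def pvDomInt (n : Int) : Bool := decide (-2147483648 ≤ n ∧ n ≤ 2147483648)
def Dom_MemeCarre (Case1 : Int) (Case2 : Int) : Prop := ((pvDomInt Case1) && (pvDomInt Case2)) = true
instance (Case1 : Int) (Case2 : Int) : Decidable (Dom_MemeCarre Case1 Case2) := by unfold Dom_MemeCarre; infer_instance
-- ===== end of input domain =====

-- B replaces A's two table scans by comparing closed-form 3x3-box indices; B intentionally
-- answers "False" for an out-of-range Case1 where A's -1 sentinel accidentally hits Carres[-1].

-- ===== PORT A =====
def pvCarres : List (List Int) :=
  [[0,1,2,9,10,11,18,19,20],[3,4,5,12,13,14,21,22,23],[6,7,8,15,16,17,24,25,26],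
   [27,28,29,36,37,38,45,46,47],[30,31,32,39,40,41,48,49,50],[33,34,35,42,43,44,51,52,53],
   [54,55,56,63,64,65,72,73,74],[57,58,59,66,67,68,75,76,77],[60,61,62,69,70,71,78,79,80]]

-- inner 'for l in range(9)' with its break (early return of the new NumMemeCarre)
def pvInnerScan (Case1 : Int) (k : Int) (nm : Int) : List Int → Int
  | [] => nm
  | l :: ls =>
      if PySem.List.pyGetD (PySem.List.pyGetD pvCarres k []) l 0 = Case1 then k
      else pvInnerScan Case1 k nm ls

-- outer 'for k in range(9)'
def pvOuterScan (Case1 : Int) (nm : Int) : List Int → Int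
  | [] => nm
  | k :: ks => pvOuterScan Case1 (pvInnerScan Case1 k nm (PySem.List.pyRange 0 9 1)) ks

-- second 'for k in range(9)' with its break
def pvLookup (Case2 : Int) (nm : Int) (msg : String) : List Int → String
  | [] => msg
  | k :: ks =>
      if PySem.List.pyGetD (PySem.List.pyGetD pvCarres nm []) k 0 = Case2 then "True"
      else pvLookup Case2 nm msg ks

def MemeCarre (Case1 : Int) (Case2 : Int) : String :=
  let numMemeCarre := pvOuterScan Case1 (-1) (PySem.List.pyRange 0 9 1)
  pvLookup Case2 numMemeCarre "False" (PySem.List.pyRange 0 9 1)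

-- ===== PORT B =====
def pvBox (c : Int) : Int :=
  PySem.Int.floordiv c 27 * 3 + PySem.Int.floordiv (PySem.Int.mod c 9) 3

def MemeCarre_alt (Case1 : Int) (Case2 : Int) : String :=
  if (0 ≤ Case1 ∧ Case1 < 81) ∧ (0 ≤ Case2 ∧ Case2 < 81) ∧ pvBox Case1 = pvBox Case2
  then "True" else "False"

-- ===== PRECONDITION & SPEC =====
-- When Case1 is outside 0..80 and Case2 lies in the bottom-right box {60,61,62,69,70,71,78,79,80},
-- A returns "True" (its -1 sentinel indexes Carres[-1], the last box); B returns "False",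
-- the intended answer since an invalid cell is in no box.
def D_MemeCarre (Case1 : Int) (Case2 : Int) : Prop :=
  (Case1 < 0 ∨ 81 ≤ Case1) ∧
  (Case2 = 60 ∨ Case2 = 61 ∨ Case2 = 62 ∨ Case2 = 69 ∨ Case2 = 70 ∨ Case2 = 71 ∨
   Case2 = 78 ∨ Case2 = 79 ∨ Case2 = 80)
instance (Case1 : Int) (Case2 : Int) : Decidable (D_MemeCarre Case1 Case2) := by
  unfold D_MemeCarre; infer_instance

def Spec_MemeCarre (Case1 : Int) (Case2 : Int) (out : String) : Prop :=
  ¬ D_MemeCarre Case1 Case2 → out = MemeCarre_alt Case1 Case2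
instance (Case1 : Int) (Case2 : Int) (out : String) : Decidable (Spec_MemeCarre Case1 Case2 out) := by
  unfold Spec_MemeCarre; infer_instance

def pvDiffWitness_MemeCarre : Int × Int := (81, 60)
def pvDiffWitnessOut_MemeCarre : String × String := ("True", "False")

-- ===== CLAIM (what is proved, stated in full; the proofs are below) =====
def Claim_unchanged_MemeCarre : Prop := ∀ (Case1 : Int) (Case2 : Int), Dom_MemeCarre Case1 Case2 → Spec_MemeCarre Case1 Case2 (MemeCarre Case1 Case2)
def Claim_changed_MemeCarre : Prop := Dom_MemeCarre (pvDiffWitness_MemeCarre.1) (pvDiffWitness_MemeCarre.2) ∧ D_MemeCarre (pvDiffWitness_MemeCarre.1) (pvDiffWitness_MemeCarre.2) ∧ MemeCarre (pvDiffWitness_MemeCarre.1) (pvDiffWitness_MemeCarre.2) = pvDiffWitnessOut_MemeCarre.1 ∧ MemeCarre_alt (pvDiffWitness_MemeCarre.1) (pvDiffWitness_MemeCarre.2) = pvDiffWitnessOut_MemeCarre.2 ∧ pvDiffWitnessOut_MemeCarre.1 ≠ pvDiffWitnessOut_MemeCarre.2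
def Claim_exact_MemeCarre : Prop := ∀ (Case1 : Int) (Case2 : Int), Dom_MemeCarre Case1 Case2 → D_MemeCarre Case1 Case2 → MemeCarre Case1 Case2 ≠ MemeCarre_alt Case1 Case2

-- ===== LEMMAS AND PROOFS =====

lemma pvBox_eq (c : Int) : pvBox c = c / 27 * 3 + c % 9 / 3 := by
  unfold pvBox
  rw [PySem.Int.mod_eq_emod_of_pos (by norm_num),
      PySem.Int.floordiv_eq_ediv_of_pos (a := c) (by norm_num),
      PySem.Int.floordiv_eq_ediv_of_pos (by norm_num)]

lemma pvDiv3 (c : Int) : 3 * (c % 9 / 3) + c % 9 % 3 = c % 9 ∧ 0 ≤ c % 9 % 3 ∧ c % 9 % 3 < 3 :=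
  ⟨Int.mul_ediv_add_emod _ _, Int.emod_nonneg _ (by norm_num), Int.emod_lt_of_pos _ (by norm_num)⟩

lemma pvRange9 : PySem.List.pyRange 0 9 1 = [0,1,2,3,4,5,6,7,8] := by decide

lemma pvInner_0 (C1 nm : Int) :
    pvInnerScan C1 0 nm (PySem.List.pyRange 0 9 1) = if C1 = 0 ∨ C1 = 1 ∨ C1 = 2 ∨ C1 = 9 ∨ C1 = 10 ∨ C1 = 11 ∨ C1 = 18 ∨ C1 = 19 ∨ C1 = 20 then 0 else nm := by
  rw [pvRange9]
  simp only [pvInnerScan]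
  norm_num [pvCarres, PySem.List.pyGetD_ofNat']
  split_ifs <;> first | rfl | omega

lemma pvInner_1 (C1 nm : Int) :
    pvInnerScan C1 1 nm (PySem.List.pyRange 0 9 1) = if C1 = 3 ∨ C1 = 4 ∨ C1 = 5 ∨ C1 = 12 ∨ C1 = 13 ∨ C1 = 14 ∨ C1 = 21 ∨ C1 = 22 ∨ C1 = 23 then 1 else nm := by
  rw [pvRange9]
  simp only [pvInnerScan]
  norm_num [pvCarres, PySem.List.pyGetD_ofNat']
  split_ifs <;> first | rfl | omega

lemma pvInner_2 (C1 nm : Int) :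
    pvInnerScan C1 2 nm (PySem.List.pyRange 0 9 1) = if C1 = 6 ∨ C1 = 7 ∨ C1 = 8 ∨ C1 = 15 ∨ C1 = 16 ∨ C1 = 17 ∨ C1 = 24 ∨ C1 = 25 ∨ C1 = 26 then 2 else nm := by
  rw [pvRange9]
  simp only [pvInnerScan]
  norm_num [pvCarres, PySem.List.pyGetD_ofNat']
  split_ifs <;> first | rfl | omega

lemma pvInner_3 (C1 nm : Int) :
    pvInnerScan C1 3 nm (PySem.List.pyRange 0 9 1) = if C1 = 27 ∨ C1 = 28 ∨ C1 = 29 ∨ C1 = 36 ∨ C1 = 37 ∨ C1 = 38 ∨ C1 = 45 ∨ C1 = 46 ∨ C1 = 47 then 3 else nm := by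
  rw [pvRange9]
  simp only [pvInnerScan]
  norm_num [pvCarres, PySem.List.pyGetD_ofNat']
  split_ifs <;> first | rfl | omega

lemma pvInner_4 (C1 nm : Int) :
    pvInnerScan C1 4 nm (PySem.List.pyRange 0 9 1) = if C1 = 30 ∨ C1 = 31 ∨ C1 = 32 ∨ C1 = 39 ∨ C1 = 40 ∨ C1 = 41 ∨ C1 = 48 ∨ C1 = 49 ∨ C1 = 50 then 4 else nm := by
  rw [pvRange9]
  simp only [pvInnerScan]
  norm_num [pvCarres, PySem.List.pyGetD_ofNat']
  split_ifs <;> first | rfl | omega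

lemma pvInner_5 (C1 nm : Int) :
    pvInnerScan C1 5 nm (PySem.List.pyRange 0 9 1) = if C1 = 33 ∨ C1 = 34 ∨ C1 = 35 ∨ C1 = 42 ∨ C1 = 43 ∨ C1 = 44 ∨ C1 = 51 ∨ C1 = 52 ∨ C1 = 53 then 5 else nm := by
  rw [pvRange9]
  simp only [pvInnerScan]
  norm_num [pvCarres, PySem.List.pyGetD_ofNat']
  split_ifs <;> first | rfl | omega

lemma pvInner_6 (C1 nm : Int) :
    pvInnerScan C1 6 nm (PySem.List.pyRange 0 9 1) = if C1 = 54 ∨ C1 = 55 ∨ C1 = 56 ∨ C1 = 63 ∨ C1 = 64 ∨ C1 = 65 ∨ C1 = 72 ∨ C1 = 73 ∨ C1 = 74 then 6 else nm := by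
  rw [pvRange9]
  simp only [pvInnerScan]
  norm_num [pvCarres, PySem.List.pyGetD_ofNat']
  split_ifs <;> first | rfl | omega

lemma pvInner_7 (C1 nm : Int) :
    pvInnerScan C1 7 nm (PySem.List.pyRange 0 9 1) = if C1 = 57 ∨ C1 = 58 ∨ C1 = 59 ∨ C1 = 66 ∨ C1 = 67 ∨ C1 = 68 ∨ C1 = 75 ∨ C1 = 76 ∨ C1 = 77 then 7 else nm := by
  rw [pvRange9]
  simp only [pvInnerScan]
  norm_num [pvCarres, PySem.List.pyGetD_ofNat']
  split_ifs <;> first | rfl | omega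

lemma pvInner_8 (C1 nm : Int) :
    pvInnerScan C1 8 nm (PySem.List.pyRange 0 9 1) = if C1 = 60 ∨ C1 = 61 ∨ C1 = 62 ∨ C1 = 69 ∨ C1 = 70 ∨ C1 = 71 ∨ C1 = 78 ∨ C1 = 79 ∨ C1 = 80 then 8 else nm := by
  rw [pvRange9]
  simp only [pvInnerScan]
  norm_num [pvCarres, PySem.List.pyGetD_ofNat']
  split_ifs <;> first | rfl | omega

lemma pvRow_0 (C2 : Int) :
    pvLookup C2 0 "False" (PySem.List.pyRange 0 9 1) = if C2 = 0 ∨ C2 = 1 ∨ C2 = 2 ∨ C2 = 9 ∨ C2 = 10 ∨ C2 = 11 ∨ C2 = 18 ∨ C2 = 19 ∨ C2 = 20 then "True" else "False" := by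
  rw [pvRange9]
  simp only [pvLookup]
  norm_num [pvCarres, PySem.List.pyGetD_ofNat']
  split_ifs <;> first | rfl | omega

lemma pvRow_1 (C2 : Int) :
    pvLookup C2 1 "False" (PySem.List.pyRange 0 9 1) = if C2 = 3 ∨ C2 = 4 ∨ C2 = 5 ∨ C2 = 12 ∨ C2 = 13 ∨ C2 = 14 ∨ C2 = 21 ∨ C2 = 22 ∨ C2 = 23 then "True" else "False" := by
  rw [pvRange9]
  simp only [pvLookup]
  norm_num [pvCarres, PySem.List.pyGetD_ofNat']
  split_ifs <;> first | rfl | omega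

lemma pvRow_2 (C2 : Int) :
    pvLookup C2 2 "False" (PySem.List.pyRange 0 9 1) = if C2 = 6 ∨ C2 = 7 ∨ C2 = 8 ∨ C2 = 15 ∨ C2 = 16 ∨ C2 = 17 ∨ C2 = 24 ∨ C2 = 25 ∨ C2 = 26 then "True" else "False" := by
  rw [pvRange9]
  simp only [pvLookup]
  norm_num [pvCarres, PySem.List.pyGetD_ofNat']
  split_ifs <;> first | rfl | omega

lemma pvRow_3 (C2 : Int) :
    pvLookup C2 3 "False" (PySem.List.pyRange 0 9 1) = if C2 = 27 ∨ C2 = 28 ∨ C2 = 29 ∨ C2 = 36 ∨ C2 = 37 ∨ C2 = 38 ∨ C2 = 45 ∨ C2 = 46 ∨ C2 = 47 then "True" else "False" := by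
  rw [pvRange9]
  simp only [pvLookup]
  norm_num [pvCarres, PySem.List.pyGetD_ofNat']
  split_ifs <;> first | rfl | omega

lemma pvRow_4 (C2 : Int) :
    pvLookup C2 4 "False" (PySem.List.pyRange 0 9 1) = if C2 = 30 ∨ C2 = 31 ∨ C2 = 32 ∨ C2 = 39 ∨ C2 = 40 ∨ C2 = 41 ∨ C2 = 48 ∨ C2 = 49 ∨ C2 = 50 then "True" else "False" := by
  rw [pvRange9]
  simp only [pvLookup]
  norm_num [pvCarres, PySem.List.pyGetD_ofNat']
  split_ifs <;> first | rfl | omega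

lemma pvRow_5 (C2 : Int) :
    pvLookup C2 5 "False" (PySem.List.pyRange 0 9 1) = if C2 = 33 ∨ C2 = 34 ∨ C2 = 35 ∨ C2 = 42 ∨ C2 = 43 ∨ C2 = 44 ∨ C2 = 51 ∨ C2 = 52 ∨ C2 = 53 then "True" else "False" := by
  rw [pvRange9]
  simp only [pvLookup]
  norm_num [pvCarres, PySem.List.pyGetD_ofNat']
  split_ifs <;> first | rfl | omega

lemma pvRow_6 (C2 : Int) :
    pvLookup C2 6 "False" (PySem.List.pyRange 0 9 1) = if C2 = 54 ∨ C2 = 55 ∨ C2 = 56 ∨ C2 = 63 ∨ C2 = 64 ∨ C2 = 65 ∨ C2 = 72 ∨ C2 = 73 ∨ C2 = 74 then "True" else "False" := by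
  rw [pvRange9]
  simp only [pvLookup]
  norm_num [pvCarres, PySem.List.pyGetD_ofNat']
  split_ifs <;> first | rfl | omega

lemma pvRow_7 (C2 : Int) :
    pvLookup C2 7 "False" (PySem.List.pyRange 0 9 1) = if C2 = 57 ∨ C2 = 58 ∨ C2 = 59 ∨ C2 = 66 ∨ C2 = 67 ∨ C2 = 68 ∨ C2 = 75 ∨ C2 = 76 ∨ C2 = 77 then "True" else "False" := by
  rw [pvRange9]
  simp only [pvLookup]
  norm_num [pvCarres, PySem.List.pyGetD_ofNat']
  split_ifs <;> first | rfl | omega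

lemma pvRow_8 (C2 : Int) :
    pvLookup C2 8 "False" (PySem.List.pyRange 0 9 1) = if C2 = 60 ∨ C2 = 61 ∨ C2 = 62 ∨ C2 = 69 ∨ C2 = 70 ∨ C2 = 71 ∨ C2 = 78 ∨ C2 = 79 ∨ C2 = 80 then "True" else "False" := by
  rw [pvRange9]
  simp only [pvLookup]
  norm_num [pvCarres, PySem.List.pyGetD_ofNat']
  split_ifs <;> first | rfl | omega

lemma pvRow_neg1 (C2 : Int) :
    pvLookup C2 (-1) "False" (PySem.List.pyRange 0 9 1) = if C2 = 60 ∨ C2 = 61 ∨ C2 = 62 ∨ C2 = 69 ∨ C2 = 70 ∨ C2 = 71 ∨ C2 = 78 ∨ C2 = 79 ∨ C2 = 80 then "True" else "False" := by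
  have hneg : PySem.List.pyGetD pvCarres (-1) ([] : List Int) = [60,61,62,69,70,71,78,79,80] := by decide
  rw [pvRange9]
  simp only [pvLookup, hneg]
  norm_num [PySem.List.pyGetD_ofNat']
  split_ifs <;> first | rfl | omega

set_option maxHeartbeats 4000000 in
lemma scan_eq (C1 : Int) :
    pvOuterScan C1 (-1) (PySem.List.pyRange 0 9 1)
      = if 0 ≤ C1 ∧ C1 < 81 then pvBox C1 else -1 := by
  by_cases hr : 0 ≤ C1 ∧ C1 < 81
  · obtain ⟨h1, h2⟩ := hr
    interval_cases C1 <;> decide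
  · rw [if_neg hr, pvRange9]
    simp only [pvOuterScan]
    simp only [pvInner_0, pvInner_1, pvInner_2, pvInner_3, pvInner_4, pvInner_5, pvInner_6, pvInner_7, pvInner_8]
    split_ifs <;> omega

lemma lookup_eq (C2 nm : Int) (h : nm = -1 ∨ (0 ≤ nm ∧ nm < 9)) :
    pvLookup C2 nm "False" (PySem.List.pyRange 0 9 1)
      = if (0 ≤ C2 ∧ C2 < 81) ∧ pvBox C2 = (if nm = -1 then 8 else nm) then "True" else "False" := by
  rcases h with h | h
  · subst h
    rw [pvRow_neg1]
    simp only [pvBox_eq]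
    have hA := pvDiv3 C2
    split_ifs <;> first | rfl | omega
  · obtain ⟨h1, h2⟩ := h
    have hA := pvDiv3 C2
    interval_cases nm
    · rw [pvRow_0]; simp only [pvBox_eq]; norm_num; split_ifs <;> first | rfl | omega
    · rw [pvRow_1]; simp only [pvBox_eq]; norm_num; split_ifs <;> first | rfl | omega
    · rw [pvRow_2]; simp only [pvBox_eq]; norm_num; split_ifs <;> first | rfl | omega
    · rw [pvRow_3]; simp only [pvBox_eq]; norm_num; split_ifs <;> first | rfl | omega
    · rw [pvRow_4]; simp only [pvBox_eq]; norm_num; split_ifs <;> first | rfl | omega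
    · rw [pvRow_5]; simp only [pvBox_eq]; norm_num; split_ifs <;> first | rfl | omega
    · rw [pvRow_6]; simp only [pvBox_eq]; norm_num; split_ifs <;> first | rfl | omega
    · rw [pvRow_7]; simp only [pvBox_eq]; norm_num; split_ifs <;> first | rfl | omega
    · rw [pvRow_8]; simp only [pvBox_eq]; norm_num; split_ifs <;> first | rfl | omega

-- ===== VERDICT (by name: the statements are the Claim_ definitions above) =====
theorem MemeCarre_spec : Claim_unchanged_MemeCarre := by
  intro C1 C2 _
  unfold Spec_MemeCarre
  intro hnD
  unfold D_MemeCarre at hnD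
  simp only [MemeCarre, MemeCarre_alt]
  by_cases h1 : 0 ≤ C1 ∧ C1 < 81
  · rw [scan_eq, if_pos h1, lookup_eq C2 (pvBox C1) (Or.inr (by rw [pvBox_eq]; have hB := pvDiv3 C1; omega))]
    have hnm : pvBox C1 ≠ -1 := by rw [pvBox_eq]; have hB := pvDiv3 C1; omega
    rw [if_neg hnm]
    simp only [pvBox_eq]
    have hA := pvDiv3 C2
    have hB := pvDiv3 C1
    split_ifs <;> first | rfl | omega
  · rw [scan_eq, if_neg h1, lookup_eq C2 (-1) (Or.inl rfl)]
    have hC2 : ¬ (C2 = 60 ∨ C2 = 61 ∨ C2 = 62 ∨ C2 = 69 ∨ C2 = 70 ∨ C2 = 71 ∨ C2 = 78 ∨ C2 = 79 ∨ C2 = 80) := by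
      intro hc; exact hnD ⟨by omega, hc⟩
    simp only [pvBox_eq]
    have hA := pvDiv3 C2
    split_ifs <;> first | rfl | omega

theorem MemeCarre_changed : Claim_changed_MemeCarre := by
  unfold Claim_changed_MemeCarre; decide

theorem MemeCarre_tight : Claim_exact_MemeCarre := by
  intro C1 C2 _ hD
  unfold D_MemeCarre at hD
  obtain ⟨h1, h2⟩ := hD
  have hA : MemeCarre C1 C2 = "True" := by
    simp only [MemeCarre]
    rw [scan_eq, if_neg (by omega), pvRow_neg1, if_pos h2]
  have hB : MemeCarre_alt C1 C2 = "False" := by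
    simp only [MemeCarre_alt]
    rw [if_neg (by omega)]
  rw [hA, hB]; decide
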